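-- pv_equiv track=rewrite | github.com/jiho7407/PS | BaekJoon/Study/Other/1790.py | Ncalc
-- ===== SOURCE A (Python) =====
-- def Ncalc(N, K):
--     Nlen = len(str(N))
--     strlen = 0
--     for i in range(1, Nlen):
--         strlen += 9 * i * (10**(i-1))
--     left = K - strlen
--     cur = (10**(Nlen-1))
--     if left > Nlen*(N-cur):
--         return False
--     else:
--         return True
-- ===== SOURCE B (Python) =====
-- def Ncalc(N, K):
--     Nlen = len(str(N))
--     m = Nlen - 1
--     strlen = (10**m * (9*m - 1) + 1) // 9
--     return K - strlen <= Nlen * (N - 10**m)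
-- ===== Notes on version B (the rewrite author's own statement) =====
-- stated objective: simpler
-- what changed: Replaced the loop summing 9*i*10**(i-1) over all digit lengths below Nlen with the exact closed form (10**(Nlen-1)*(9*(Nlen-1)-1)+1)//9 and returned the comparison directly.
import Mathlib
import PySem

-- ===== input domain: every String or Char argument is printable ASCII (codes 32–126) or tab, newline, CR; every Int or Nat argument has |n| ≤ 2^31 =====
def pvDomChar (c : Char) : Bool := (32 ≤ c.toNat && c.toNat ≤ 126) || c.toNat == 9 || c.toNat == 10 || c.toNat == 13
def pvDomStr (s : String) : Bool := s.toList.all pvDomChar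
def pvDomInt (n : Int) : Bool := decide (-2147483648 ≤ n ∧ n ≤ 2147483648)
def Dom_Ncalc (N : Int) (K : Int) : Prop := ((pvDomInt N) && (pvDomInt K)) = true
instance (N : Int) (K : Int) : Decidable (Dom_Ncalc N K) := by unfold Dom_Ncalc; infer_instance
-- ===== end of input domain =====

-- B replaces A's digit-count accumulation loop with the exact closed form (10^m*(9m-1)+1)//9; simpler, not measured faster.

-- ===== PORT A =====
def Ncalc (N : Int) (K : Int) : Bool :=
  let Nlen : Int := PySem.Str.len (PySem.Int.toStr N)
  let strlen : Int := (PySem.List.pyRange 1 Nlen).foldl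
    (fun acc i => acc + 9 * i * 10 ^ (i - 1).toNat) 0
  let left := K - strlen
  let cur : Int := 10 ^ (Nlen - 1).toNat
  if left > Nlen * (N - cur) then false else true

-- ===== PORT B =====
def Ncalc_alt (N : Int) (K : Int) : Bool :=
  let Nlen : Int := PySem.Str.len (PySem.Int.toStr N)
  let m := Nlen - 1
  let strlen : Int := PySem.Int.floordiv (10 ^ m.toNat * (9 * m - 1) + 1) 9
  decide (K - strlen ≤ Nlen * (N - 10 ^ m.toNat))

-- ===== PRECONDITION & SPEC =====
def Spec_Ncalc (N : Int) (K : Int) (out : Bool) : Prop := out = Ncalc_alt N K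
instance (N : Int) (K : Int) (out : Bool) : Decidable (Spec_Ncalc N K out) := by unfold Spec_Ncalc; infer_instance

-- ===== CLAIM (what is proved, stated in full; the proofs are below) =====
def Claim_equal_Ncalc : Prop := ∀ (N : Int) (K : Int), Dom_Ncalc N K → Spec_Ncalc N K (Ncalc N K)

-- ===== LEMMAS AND PROOFS =====

-- str(n) is never the empty string
lemma toDigitsCore_len (b : Nat) : ∀ (fuel n : Nat) (ds : List Char),
    ds.length ≤ (Nat.toDigitsCore b fuel n ds).length := by
  intro fuel
  induction fuel with
  | zero => intro n ds; simp [Nat.toDigitsCore]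
  | succ f ih =>
      intro n ds
      rw [Nat.toDigitsCore]
      split
      · simp
      · exact le_trans (by simp) (ih _ _)

lemma toChars_len_pos (n : Int) : 1 ≤ (PySem.Int.toChars n).length := by
  unfold PySem.Int.toChars
  split
  · simp
  · unfold Nat.toDigits
    rw [Nat.toDigitsCore]
    split
    · simp
    · calc (1 : Nat) = ([(n.toNat % 10).digitChar]).length := rfl
        _ ≤ _ := toDigitsCore_len 10 _ _ _

-- the loop sum, multiplied by 9, equals the closed-form numerator
lemma nine_mul_sum (n : Nat) (hn : 1 ≤ n) :
    9 * (PySem.List.pyRange 1 (n : Int)).foldl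
      (fun acc i => acc + 9 * i * 10 ^ (i - 1).toNat) 0
      = 10 ^ (n - 1) * (9 * ((n : Int) - 1) - 1) + 1 := by
  induction n with
  | zero => omega
  | succ k ih =>
      rcases Nat.eq_or_lt_of_le hn with h1 | h1
      · -- n = 1 : empty range
        have : (k : Int) + 1 = 1 := by exact_mod_cast h1.symm
        have hk : k = 0 := by omega
        subst hk
        decide
      · have hk : 1 ≤ k := by omega
        have hle : (1 : Int) ≤ (k : Int) := by exact_mod_cast hk
        push_cast
        rw [PySem.List.pyRange_one_succ_right hle, List.foldl_append]
        simp only [List.foldl]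
        have hx : ((k : Int) - 1).toNat = k - 1 := by omega
        have hpow : (10 : Int) ^ k = 10 ^ (k - 1) * 10 := by
          rw [← pow_succ]; congr 1; omega
        rw [mul_add, ih hk, hx, hpow]
        ring

lemma sum_closed (n : Nat) (hn : 1 ≤ n) :
    (PySem.List.pyRange 1 (n : Int)).foldl
      (fun acc i => acc + 9 * i * 10 ^ (i - 1).toNat) 0
      = PySem.Int.floordiv (10 ^ (n - 1) * (9 * ((n : Int) - 1) - 1) + 1) 9 := by
  rw [← nine_mul_sum n hn]
  show _ = Int.fdiv _ _
  rw [Int.mul_fdiv_cancel_left _ (by norm_num)]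

-- ===== VERDICT (by name: the statement is the Claim_ definition above) =====
theorem Ncalc_spec : Claim_equal_Ncalc := by
  intro N K _
  unfold Spec_Ncalc Ncalc Ncalc_alt
  rw [PySem.Str.len_eq, PySem.Int.toList_toStr]
  set n : Nat := (PySem.Int.toChars N).length with hn
  have hn1 : 1 ≤ n := toChars_len_pos N
  have h1 : ((n : Int) - 1).toNat = n - 1 := by omega
  simp only [sum_closed n hn1, h1]
  rcases le_or_gt (K - PySem.Int.floordiv (10 ^ (n - 1) * (9 * ((n : Int) - 1) - 1) + 1) 9)
      ((n : Int) * (N - 10 ^ (n - 1))) with h | h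
  · rw [if_neg (by omega)]; exact (decide_eq_true h).symm
  · rw [if_pos h]; exact (decide_eq_false (by omega)).symm
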